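-- pv_equiv track=rewrite | github.com/okihane/TYUT-HealthDK | pulltemp.py | abcd4
-- ===== SOURCE A (Python) =====
-- def abcd4(_0x11dbf0, _0x1558df):
-- 	if abcdx():
-- 		return
-- 	_0x556c7b = list(_0x1558df)
-- 	_0x27312b = len(_0x1558df)
-- 	for _0x107cfb in range(0,len(_0x11dbf0)):
-- 		_0x410c33 = int(_0x11dbf0[_0x107cfb])
-- 		_0x43a652 = _0x556c7b[_0x410c33]
-- 		_0x433a77 = _0x556c7b[_0x27312b - 1 - _0x410c33]
-- 		_0x556c7b[_0x410c33] = _0x433a77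
-- 		_0x556c7b[_0x27312b - 1 - _0x410c33] = _0x43a652
-- 	_0x1558df = ''.join(_0x556c7b)
-- 	return _0x1558df
--
-- def abcdx():
-- 	return False
-- ===== SOURCE B (Python) =====
-- def abcd4(_0x11dbf0, _0x1558df):
--     n = len(_0x1558df)
--     cnt = {}
--     for t in _0x11dbf0:
--         i = int(t)
--         p = min(i, n - 1 - i)
--         cnt[p] = cnt.get(p, 0) + 1
--     return ''.join(
--         _0x1558df[n - 1 - j] if cnt.get(min(j, n - 1 - j), 0) % 2 else _0x1558df[j]
--         for j in range(n))
-- ===== Notes on version B (the rewrite author's own statement) =====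
-- stated objective: alternative
-- what changed: A mutates a char list by performing every swap in sequence; B never simulates swaps: it counts instructions per normalized pair in a dict in one pass and then builds the output positionally, picking s[j] or s[n-1-j] by the parity of that pair's count.
import Mathlib
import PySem

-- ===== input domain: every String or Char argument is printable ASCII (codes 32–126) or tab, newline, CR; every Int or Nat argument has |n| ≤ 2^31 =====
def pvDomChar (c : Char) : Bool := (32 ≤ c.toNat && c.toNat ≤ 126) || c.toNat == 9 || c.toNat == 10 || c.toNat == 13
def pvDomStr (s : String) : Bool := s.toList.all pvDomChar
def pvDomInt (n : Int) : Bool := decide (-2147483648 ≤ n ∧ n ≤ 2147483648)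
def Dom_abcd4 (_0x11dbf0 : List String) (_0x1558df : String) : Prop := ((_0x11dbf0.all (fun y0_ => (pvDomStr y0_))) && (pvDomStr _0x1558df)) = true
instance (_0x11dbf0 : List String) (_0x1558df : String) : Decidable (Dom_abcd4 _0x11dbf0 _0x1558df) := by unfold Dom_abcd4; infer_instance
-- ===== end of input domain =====

-- B replaces A's sequential swap simulation by a one-pass parity dict over normalized
-- pairs plus a positional rebuild (objective: alternative, same cost, no mutation).

-- ===== PORT A =====
def abcdx : Bool := false

-- one iteration of A's loop; `none` = the Python exception (ValueError / IndexError)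
def abcd4Step (n : Int) (st : Option (List Char)) (t : String) : Option (List Char) :=
  match st with
  | none => none
  | some seq =>
    match PySem.Int.ofStr? t with
    | none => none
    | some i =>
      match PySem.List.pyGet? seq i, PySem.List.pyGet? seq (n - 1 - i) with
      | some a, some b =>
        (PySem.List.pySet? seq i b).bind (fun seq1 => PySem.List.pySet? seq1 (n - 1 - i) a)
      | _, _ => none

def abcd4 (_0x11dbf0 : List String) (_0x1558df : String) : String :=
  if abcdx then "" else  -- dead branch: abcdx is constantly False (Python would return None here)
  let seq := _0x1558df.toList
  let n : Int := PySem.Str.len _0x1558df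
  match _0x11dbf0.foldl (abcd4Step n) (some seq) with
  | some res => String.ofList res
  | none => ""  -- unreachable under Pre_abcd4 (the Python raises there)

-- ===== PORT B =====
-- the parity dict: key = min(i, n-1-i), value = number of instructions touching that pair
def abcd4CntStep (n : Int) (st : Option (PySem.Dict Int Int)) (t : String) : Option (PySem.Dict Int Int) :=
  st.bind (fun d => (PySem.Int.ofStr? t).map (fun i =>
    let p := min i (n - 1 - i)
    d.insert p (d.getD p 0 + 1)))

def abcd4_alt (_0x11dbf0 : List String) (_0x1558df : String) : String :=
  let n : Int := PySem.Str.len _0x1558df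
  match _0x11dbf0.foldl (abcd4CntStep n) (some PySem.Dict.empty) with
  | none => ""  -- ValueError path, unreachable under Pre_abcd4
  | some cnt =>
    String.ofList ((PySem.List.pyRange 0 n 1).map (fun j =>
      if PySem.Int.mod (cnt.getD (min j (n - 1 - j)) 0) 2 ≠ 0
      then PySem.List.pyGetD _0x1558df.toList (n - 1 - j) ' '
      else PySem.List.pyGetD _0x1558df.toList j ' '))

-- ===== PRECONDITION & SPEC =====
-- Pre_ excludes exactly the inputs on which the Python A raises: an instruction that is
-- not an int literal (ValueError) or whose value is outside [0, len(s)) (IndexError;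
-- negative values also raise, via the mirror index n-1-i ≥ n).
def Pre_abcd4 (_0x11dbf0 : List String) (_0x1558df : String) : Prop :=
  _0x11dbf0.all (fun t =>
    match PySem.Int.ofStr? t with
    | some i => decide (0 ≤ i ∧ i < PySem.Str.len _0x1558df)
    | none => false) = true
instance (_0x11dbf0 : List String) (_0x1558df : String) : Decidable (Pre_abcd4 _0x11dbf0 _0x1558df) := by unfold Pre_abcd4; infer_instance

def pvWitness_abcd4 : List String × String := (["0", " 2 ", "+1", "0"], "abcd")

def Spec_abcd4 (_0x11dbf0 : List String) (_0x1558df : String) (out : String) : Prop := out = abcd4_alt _0x11dbf0 _0x1558df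
instance (_0x11dbf0 : List String) (_0x1558df : String) (out : String) : Decidable (Spec_abcd4 _0x11dbf0 _0x1558df out) := by unfold Spec_abcd4; infer_instance

-- ===== CLAIM (what is proved, stated in full; the proofs are below) =====
def Claim_equal_abcd4 : Prop := ∀ (_0x11dbf0 : List String) (_0x1558df : String), Dom_abcd4 _0x11dbf0 _0x1558df → Pre_abcd4 _0x11dbf0 _0x1558df → Spec_abcd4 _0x11dbf0 _0x1558df (abcd4 _0x11dbf0 _0x1558df)

-- ===== LEMMAS AND PROOFS =====

def swapN (nn : Nat) (seq : List Char) (k : Nat) : List Char :=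
  (seq.set k (seq.getD (nn - 1 - k) ' ')).set (nn - 1 - k) (seq.getD k ' ')

theorem getD_set_lt (l : List Char) (i j : Nat) (a : Char) (hj : j < l.length) :
    (l.set i a).getD j ' ' = if i = j then a else l.getD j ' ' := by
  simp [List.getD_eq_getElem?_getD, List.getElem?_set]
  split_ifs with h1 h2 <;> simp_all

theorem getD_swapN (nn : Nat) (seq : List Char) (k j : Nat)
    (hlen : seq.length = nn) (hk : k < nn) (hj : j < nn) :
    (swapN nn seq k).getD j ' ' =
      if j = k ∨ j = nn - 1 - k then seq.getD (nn - 1 - j) ' ' else seq.getD j ' ' := by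
  unfold swapN
  rw [getD_set_lt _ _ _ _ (by simp [hlen]; omega), getD_set_lt _ _ _ _ (by simp [hlen]; omega)]
  by_cases h1 : nn - 1 - k = j
  · rw [if_pos h1, if_pos (Or.inr h1.symm)]
    have e : nn - 1 - j = k := by omega
    rw [e]
  · rw [if_neg h1]
    by_cases h2 : k = j
    · rw [if_pos h2, if_pos (Or.inl h2.symm)]
      have e : nn - 1 - j = nn - 1 - k := by omega
      rw [e]
    · rw [if_neg h2, if_neg (by omega : ¬(j = k ∨ j = nn - 1 - k))]

theorem getD_foldl_swapN (nn : Nat) (I : List Nat) (seq : List Char)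
    (hlen : seq.length = nn) (hI : ∀ k ∈ I, k < nn) (j : Nat) (hj : j < nn) :
    (I.foldl (swapN nn) seq).getD j ' ' =
      if (I.countP (fun k => min k (nn - 1 - k) = min j (nn - 1 - j))) % 2 = 1
      then seq.getD (nn - 1 - j) ' ' else seq.getD j ' ' := by
  induction I generalizing seq with
  | nil => simp
  | cons k I ih =>
    have hk : k < nn := hI k List.mem_cons_self
    have hlen' : (swapN nn seq k).length = nn := by simp [swapN, hlen]
    rw [List.foldl_cons, ih (swapN nn seq k) hlen' (fun x hx => hI x (List.mem_cons_of_mem _ hx)),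
        List.countP_cons]
    rw [getD_swapN nn seq k j hlen hk hj, getD_swapN nn seq k (nn - 1 - j) hlen hk (by omega)]
    by_cases hm : min k (nn - 1 - k) = min j (nn - 1 - j)
    · have hpair : j = k ∨ j = nn - 1 - k := by omega
      have hpair' : nn - 1 - j = k ∨ nn - 1 - j = nn - 1 - k := by omega
      have hjj : nn - 1 - (nn - 1 - j) = j := by omega
      simp only [hm, decide_true, if_pos hpair, if_pos hpair', hjj]
      split_ifs with h1 h2 h3 <;> try rfl
      · omega
      · omega
    · have hpair : ¬ (j = k ∨ j = nn - 1 - k) := by omega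
      have hpair' : ¬ (nn - 1 - j = k ∨ nn - 1 - j = nn - 1 - k) := by omega
      simp only [hm, decide_false, if_neg hpair, if_neg hpair']
      simp

theorem length_swapN (nn : Nat) (seq : List Char) (k : Nat) : (swapN nn seq k).length = seq.length := by
  simp [swapN]

theorem length_foldl_swapN (nn : Nat) (I : List Nat) (seq : List Char) :
    (I.foldl (swapN nn) seq).length = seq.length := by
  induction I generalizing seq with
  | nil => rfl
  | cons k I ih => simp [List.foldl_cons, ih, length_swapN]

def PreB (L : List String) (n : Int) : Prop :=
  L.all (fun t =>
    match PySem.Int.ofStr? t with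
    | some i => decide (0 ≤ i ∧ i < n)
    | none => false) = true

theorem foldl_step_eq (nn : Nat) (L : List String) (hL : PreB L (nn : Int)) (seq : List Char)
    (hlen : seq.length = nn) :
    L.foldl (abcd4Step (nn : Int)) (some seq) =
      some ((L.map (fun t => ((PySem.Int.ofStr? t).getD 0).toNat)).foldl (swapN nn) seq) := by
  induction L generalizing seq with
  | nil => rfl
  | cons t L ih =>
    simp only [PreB, List.all_cons, Bool.and_eq_true] at hL
    obtain ⟨ht, hrest⟩ := hL
    obtain ⟨i, hi, hb⟩ : ∃ i, PySem.Int.ofStr? t = some i ∧ (0 ≤ i ∧ i < (nn : Int)) := by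
      cases h : PySem.Int.ofStr? t with
      | none => rw [h] at ht; simp at ht
      | some i => rw [h] at ht; simp at ht; exact ⟨i, rfl, by exact_mod_cast ht⟩
    have hmir : 0 ≤ (nn : Int) - 1 - i ∧ (nn : Int) - 1 - i < (nn : Int) := by omega
    have hg1 : PySem.List.pyGet? seq i = some (seq.getD i.toNat ' ') := by
      rw [PySem.List.pyGet?_eq_some_getElem (h0 := hb.1) (h1 := by rw [hlen]; exact hb.2)]
      rw [List.getD_eq_getElem seq ' ' (by omega)]
    have hg2 : PySem.List.pyGet? seq ((nn : Int) - 1 - i) = some (seq.getD (nn - 1 - i.toNat) ' ') := by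
      have eidx : ((nn : Int) - 1 - i).toNat = nn - 1 - i.toNat := by omega
      rw [PySem.List.pyGet?_eq_some_getElem (h0 := hmir.1) (h1 := by rw [hlen]; exact hmir.2)]
      simp only [eidx]
      rw [List.getD_eq_getElem seq ' ' (by omega)]
    have hs1 : PySem.List.pySet? seq i (seq.getD (nn - 1 - i.toNat) ' ') =
        some (seq.set i.toNat (seq.getD (nn - 1 - i.toNat) ' ')) := by
      simp only [PySem.List.pySet?, PySem.List.pyIdx?]
      simp [hb.1, hlen]
      exact hb.2
    have hs2 : PySem.List.pySet? (seq.set i.toNat (seq.getD (nn - 1 - i.toNat) ' '))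
        ((nn : Int) - 1 - i) (seq.getD i.toNat ' ') =
        some (swapN nn seq i.toNat) := by
      simp only [PySem.List.pySet?, PySem.List.pyIdx?]
      simp [hlen, swapN]
      refine ⟨nn - 1 - i.toNat, ?_, rfl⟩
      rw [if_pos hb.2, if_pos (by omega)]
      congr 1
      omega
    rw [List.foldl_cons, List.map_cons, List.foldl_cons]
    have hstep : abcd4Step (nn : Int) (some seq) t = some (swapN nn seq i.toNat) := by
      simp only [abcd4Step, hi, hg1, hg2, hs1, Option.bind_some, hs2]
    rw [hstep, hi]
    exact ih hrest (swapN nn seq i.toNat) (by simp [swapN, hlen])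

theorem cnt_fold_eq (n : Int) (L : List String) (hL : PreB L n) (d : PySem.Dict Int Int) :
    L.foldl (abcd4CntStep n) (some d) =
      some ((L.map (fun t =>
        min ((PySem.Int.ofStr? t).getD 0) (n - 1 - (PySem.Int.ofStr? t).getD 0))).foldl
          (fun d p => d.insert p (d.getD p 0 + 1)) d) := by
  induction L generalizing d with
  | nil => rfl
  | cons t L ih =>
    simp only [PreB, List.all_cons, Bool.and_eq_true] at hL
    obtain ⟨ht, hrest⟩ := hL
    obtain ⟨i, hi⟩ : ∃ i, PySem.Int.ofStr? t = some i := by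
      cases h : PySem.Int.ofStr? t with
      | none => rw [h] at ht; simp at ht
      | some i => exact ⟨i, rfl⟩
    rw [List.foldl_cons, List.map_cons, List.foldl_cons]
    have hstep : abcd4CntStep n (some d) t =
        some (d.insert (min i (n - 1 - i)) (d.getD (min i (n - 1 - i)) 0 + 1)) := by
      simp [abcd4CntStep, hi]
    rw [hstep, hi]
    exact ih hrest _

theorem main_list_eq (L : List String) (cs : List Char) (hL : PreB L (cs.length : Int)) :
    (L.map (fun t => ((PySem.Int.ofStr? t).getD 0).toNat)).foldl (swapN cs.length) cs =
      (PySem.List.pyRange 0 (cs.length : Int) 1).map (fun j =>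
        if PySem.Int.mod
            (((L.map (fun t =>
              min ((PySem.Int.ofStr? t).getD 0) ((cs.length : Int) - 1 - (PySem.Int.ofStr? t).getD 0))).foldl
                (fun d p => d.insert p (d.getD p 0 + 1)) PySem.Dict.empty).getD
              (min j ((cs.length : Int) - 1 - j)) 0) 2 ≠ 0
        then PySem.List.pyGetD cs ((cs.length : Int) - 1 - j) ' '
        else PySem.List.pyGetD cs j ' ') := by
  have hnn : ∀ t ∈ L, ∃ i, PySem.Int.ofStr? t = some i ∧ 0 ≤ i ∧ i < (cs.length : Int) := by
    intro t ht
    have := (List.all_eq_true.mp hL) t ht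
    cases h : PySem.Int.ofStr? t with
    | none => rw [h] at this; simp at this
    | some i => rw [h] at this; simp at this; exact ⟨i, rfl, by exact_mod_cast this⟩
  rw [PySem.List.pyRange_zero_natCast, List.map_map]
  have hIlt : ∀ k ∈ L.map (fun t => ((PySem.Int.ofStr? t).getD 0).toNat), k < cs.length := by
    intro k hk
    obtain ⟨t, ht, rfl⟩ := List.mem_map.mp hk
    obtain ⟨i, hi, h0, h1⟩ := hnn t ht
    rw [hi]
    simp only [Option.getD_some]
    omega
  have hlenR : (List.foldl (swapN cs.length) cs
      (L.map (fun t => ((PySem.Int.ofStr? t).getD 0).toNat))).length = cs.length :=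
    length_foldl_swapN _ _ _
  apply List.ext_getElem
  · rw [hlenR, List.length_map, List.length_range]
  · intro j hj1 hj2
    have hj : j < cs.length := by simpa [hlenR] using hj1
    rw [← List.getD_eq_getElem _ ' ' hj1]
    rw [getD_foldl_swapN cs.length _ cs rfl hIlt j hj]
    have hjr : j < (List.range cs.length).length := by simpa using hj
    rw [List.getElem_map, List.getElem_range]
    simp only [Function.comp_apply]
    -- count bridge
    have hcnt : ((L.map (fun t =>
          min ((PySem.Int.ofStr? t).getD 0) ((cs.length : Int) - 1 - (PySem.Int.ofStr? t).getD 0))).foldl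
            (fun d p => d.insert p (d.getD p 0 + 1)) PySem.Dict.empty).getD
          (min (j : Int) ((cs.length : Int) - 1 - (j : Int))) 0
        = ((L.map (fun t => ((PySem.Int.ofStr? t).getD 0).toNat)).countP
            (fun k => min k (cs.length - 1 - k) = min j (cs.length - 1 - j)) : Int) := by
      rw [PySem.Dict.getD_foldl_insert_add_one]
      simp only [PySem.Dict.getD_empty]
      rw [List.count, List.countP_map, List.countP_map]
      norm_num
      apply List.countP_congr
      intro t ht
      obtain ⟨i, hi, h0, h1⟩ := hnn t ht
      simp [Function.comp, hi]
      constructor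
      · intro h; omega
      · intro h; omega
    rw [hcnt]
    by_cases hp : (L.map (fun t => ((PySem.Int.ofStr? t).getD 0).toNat)).countP
        (fun k => min k (cs.length - 1 - k) = min j (cs.length - 1 - j)) % 2 = 1
    · rw [if_pos hp, if_pos]
      · rw [PySem.List.pyGetD_of_nonneg cs ' ' (by omega)]
        congr 1
        omega
      · rw [PySem.Int.mod_eq_emod_of_pos (by omega)]
        omega
    · rw [if_neg hp, if_neg]
      · simp
      · rw [PySem.Int.mod_eq_emod_of_pos (by omega)]
        omega

-- ===== VERDICT (by name: the statement is the Claim_ definition above) =====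
theorem abcd4_spec : Claim_equal_abcd4 := by
  intro L s _hDom hPre
  unfold Spec_abcd4
  show abcd4 L s = abcd4_alt L s
  have hlen := PySem.Str.len_eq s
  have hPreB : PreB L (s.toList.length : Int) := by
    unfold Pre_abcd4 at hPre
    unfold PreB
    rw [← hlen]
    exact hPre
  simp only [abcd4, abcd4_alt, abcdx, Bool.false_eq_true, if_false, hlen]
  rw [foldl_step_eq s.toList.length L hPreB s.toList rfl,
      cnt_fold_eq (s.toList.length : Int) L hPreB PySem.Dict.empty]
  exact congrArg String.ofList (main_list_eq L s.toList hPreB)
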